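-- pv_equiv track=rewrite | github.com/Safaet-Rabbi/Python | Codeforce/1015C.py | min_compressions
-- ===== SOURCE A (Python) =====
-- def min_compressions(n, m, songs):
--     total_size = sum(a for a, b in songs)
--
--     if total_size <= m:
--         return 0
--
--     savings = [(a - b) for a, b in songs]
--     savings.sort(reverse=True)
--     compressions = 0
--     for save in savings:
--         total_size -= save
--         compressions += 1
--         if total_size <= m:
--             return compressions
--
--     return -1
-- ===== SOURCE B (Python) =====
-- def min_compressions(n, m, songs):
--     total = sum(a for a, b in songs)
--     if total <= m:
--         return 0
--     savings = [a - b for a, b in songs]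
--     count = 0
--     while savings:
--         best = max(savings)
--         savings.remove(best)
--         total -= best
--         count += 1
--         if total <= m:
--             return count
--     return -1
-- ===== Notes on version B (the rewrite author's own statement) =====
-- stated objective: alternative
-- what changed: B drops the full descending sort and instead selects the current maximum saving on demand (max + remove of the first occurrence) from the unsorted list each round, stopping as soon as the total fits.
import Mathlib
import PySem

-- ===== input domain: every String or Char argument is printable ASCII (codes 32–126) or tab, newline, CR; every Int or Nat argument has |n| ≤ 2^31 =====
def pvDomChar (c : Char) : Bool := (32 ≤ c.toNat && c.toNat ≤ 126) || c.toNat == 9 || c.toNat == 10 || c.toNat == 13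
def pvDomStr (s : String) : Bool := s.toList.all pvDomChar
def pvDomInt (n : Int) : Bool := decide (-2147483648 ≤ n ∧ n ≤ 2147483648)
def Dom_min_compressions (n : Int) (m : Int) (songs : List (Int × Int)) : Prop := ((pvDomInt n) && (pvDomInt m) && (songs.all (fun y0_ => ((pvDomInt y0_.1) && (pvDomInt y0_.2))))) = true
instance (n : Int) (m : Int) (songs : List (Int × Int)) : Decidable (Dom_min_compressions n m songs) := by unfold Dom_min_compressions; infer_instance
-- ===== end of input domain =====

-- B replaces A's full descending sort by on-demand selection of the current maximum saving
-- (max + remove of its first occurrence); same return value, no speed claim (alternative algorithm).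

-- ===== PORT A =====
-- the 'for save in savings' loop of A over the descending-sorted savings
def aLoop (m : Int) : List Int → Int → Int → Int
  | [], _, _ => -1
  | save :: rest, total, compressions =>
    let total := total - save
    let compressions := compressions + 1
    if total ≤ m then compressions else aLoop m rest total compressions

def min_compressions (n : Int) (m : Int) (songs : List (Int × Int)) : Int :=
  let total_size := songs.foldl (fun s p => s + p.1) 0
  if total_size ≤ m then 0
  else
    let savings := songs.map (fun p => p.1 - p.2)
    let savings := PySem.List.sorted savings (fun x => x) true
    aLoop m savings total_size 0

-- ===== PORT B =====
-- B's 'while savings' loop: best = max(savings); savings.remove(best).  Since best ∈ savings,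
-- Python's list.remove of the first occurrence is exactly List.erase (PySem.List.remove?_eq_some_erase).
def bLoop (m : Int) (savings : List Int) (total count : Int) : Int :=
  match h : PySem.List.max? savings (fun x => x) with
  | none => -1
  | some best =>
    let savings' := savings.erase best
    let total' := total - best
    let count' := count + 1
    if total' ≤ m then count' else bLoop m savings' total' count'
termination_by savings.length
decreasing_by
  have hb := PySem.List.max?_mem h
  have h1 := List.length_erase_of_mem hb
  have h2 := List.length_pos_of_mem hb
  omega

def min_compressions_alt (n : Int) (m : Int) (songs : List (Int × Int)) : Int :=
  let total := songs.foldl (fun s p => s + p.1) 0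
  if total ≤ m then 0
  else
    let savings := songs.map (fun p => p.1 - p.2)
    bLoop m savings total 0

-- ===== PRECONDITION & SPEC =====
def Spec_min_compressions (n : Int) (m : Int) (songs : List (Int × Int)) (out : Int) : Prop := out = min_compressions_alt n m songs
instance (n : Int) (m : Int) (songs : List (Int × Int)) (out : Int) : Decidable (Spec_min_compressions n m songs out) := by unfold Spec_min_compressions; infer_instance

-- ===== CLAIM (what is proved, stated in full; the proofs are below) =====
def Claim_equal_min_compressions : Prop := ∀ (n : Int) (m : Int) (songs : List (Int × Int)), Dom_min_compressions n m songs → Spec_min_compressions n m songs (min_compressions n m songs)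

-- ===== LEMMAS AND PROOFS =====

-- repeated first-max extraction reproduces the descending-sorted list head by head
theorem sorted_rev_eq_max_cons (l : List Int) (b : Int)
    (h : PySem.List.max? l (fun x => x) = some b) :
    PySem.List.sorted l (fun x => x) true = b :: PySem.List.sorted (l.erase b) (fun x => x) true := by
  have hb : b ∈ l := PySem.List.max?_mem h
  have hmax : ∀ y ∈ l, y ≤ b := PySem.List.max?_isMax h
  -- both sides are permutations of l and non-increasing; such a list is unique
  apply List.Perm.eq_of_pairwise (le := fun a c : Int => c ≤ a)
  · intro a c _ _ h1 h2; omega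
  · exact PySem.List.sorted_pairwise_rev ..
  · refine List.Pairwise.cons ?_ (PySem.List.sorted_pairwise_rev ..)
    intro y hy
    exact hmax y (List.mem_of_mem_erase ((PySem.List.mem_sorted ..).mp hy))
  · exact (PySem.List.sorted_perm ..).trans ((List.perm_cons_erase hb).trans
      (List.Perm.cons b (PySem.List.sorted_perm ..).symm))

theorem bLoop_eq_aLoop (m : Int) (l : List Int) (total count : Int) :
    bLoop m l total count = aLoop m (PySem.List.sorted l (fun x => x) true) total count := by
  induction hn : l.length using Nat.strong_induction_on generalizing l total count with
  | _ n ih =>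
    match h : PySem.List.max? l (fun x => x) with
    | none =>
      have hl : l = [] := (PySem.List.max?_eq_none_iff ..).mp h
      subst hl
      rw [(PySem.List.sorted_eq_nil_iff ..).mpr rfl, bLoop.eq_def, h]
      rfl
    | some b =>
      have hb : b ∈ l := PySem.List.max?_mem h
      rw [sorted_rev_eq_max_cons l b h, bLoop.eq_def, h]
      show (if total - b ≤ m then count + 1
              else bLoop m (l.erase b) (total - b) (count + 1)) =
           (if total - b ≤ m then count + 1
              else aLoop m (PySem.List.sorted (l.erase b) (fun x => x) true) (total - b) (count + 1))
      split_ifs with hfit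
      · rfl
      · subst hn
        have h1 := List.length_erase_of_mem hb
        have h2 := List.length_pos_of_mem hb
        exact ih ((l.erase b).length) (by omega) _ _ _ rfl

-- ===== VERDICT (by name: the statement is the Claim_ definition above) =====
theorem min_compressions_spec : Claim_equal_min_compressions := by
  intro n m songs _
  unfold Spec_min_compressions min_compressions min_compressions_alt
  simp only
  split_ifs with h
  · rfl
  · exact (bLoop_eq_aLoop m _ _ _).symm
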